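-- pv_equiv track=rewrite | github.com/hs282/open-cravat-modules-karchinlab | converters/vcf-converter/vcf-converter.py | trim_variant
-- ===== SOURCE A (Python) =====
-- def trim_variant(pos, ref, alt):
--     if len(ref) == 1 and len(alt) == 1:
--         return pos, ref, alt
--     ref = list(ref)
--     alt = list(alt)
--     adj = 0
--     while ref and alt and ref[0]==alt[0]:
--         adj += 1
--         ref.pop(0)
--         alt.pop(0)
--     while ref and alt and ref[-1]==alt[-1]:
--         ref.pop()
--         alt.pop()
--     ref = ''.join(ref) if ref else '-'
--     alt = ''.join(alt) if alt else '-'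
--     return pos+adj, ref, alt
-- ===== SOURCE B (Python) =====
-- def _cpl(x, y):
--     n = 0
--     for c, d in zip(x, y):
--         if c != d:
--             break
--         n += 1
--     return n
--
-- def trim_variant(pos, ref, alt):
--     if len(ref) == 1 and len(alt) == 1:
--         return pos, ref, alt
--     i = _cpl(ref, alt)
--     r, a = ref[i:], alt[i:]
--     j = _cpl(r[::-1], a[::-1])
--     r = r[:len(r) - j] or '-'
--     a = a[:len(a) - j] or '-'
--     return pos + i, r, a
-- ===== Notes on version B (the rewrite author's own statement) =====
-- stated objective: faster
-- what changed: Replaces A's repeated pop(0)/pop() list mutation loops (each pop(0) is O(n)) by computing the common prefix length and the common suffix length of the remainders once and taking a single slice.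
import Mathlib
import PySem

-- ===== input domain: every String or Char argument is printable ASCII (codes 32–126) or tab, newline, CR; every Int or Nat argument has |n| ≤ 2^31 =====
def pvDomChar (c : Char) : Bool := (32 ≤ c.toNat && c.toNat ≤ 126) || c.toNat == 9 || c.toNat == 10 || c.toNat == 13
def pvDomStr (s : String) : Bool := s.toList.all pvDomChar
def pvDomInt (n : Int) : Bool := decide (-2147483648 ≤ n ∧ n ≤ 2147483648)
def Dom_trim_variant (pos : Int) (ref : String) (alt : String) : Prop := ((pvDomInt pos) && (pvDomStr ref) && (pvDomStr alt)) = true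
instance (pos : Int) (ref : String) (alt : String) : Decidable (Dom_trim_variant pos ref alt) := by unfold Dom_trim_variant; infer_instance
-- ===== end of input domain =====

-- B replaces A's quadratic pop(0)/pop() mutation loops by one common-prefix and one
-- common-suffix length computation followed by a single slice (linear time).

-- ===== PORT A =====
-- while ref and alt and ref[0]==alt[0]: adj += 1; ref.pop(0); alt.pop(0)
def trimLoop1 (r a : List Char) (adj : Int) : List Char × List Char × Int :=
  match r, a with
  | c :: r', d :: a' => if c = d then trimLoop1 r' a' (adj + 1) else (c :: r', d :: a', adj)
  | r, a => (r, a, adj)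

-- while ref and alt and ref[-1]==alt[-1]: ref.pop(); alt.pop()
def trimLoop2 (r a : List Char) : List Char × List Char :=
  if h : r ≠ [] ∧ a ≠ [] ∧ r.getLast? = a.getLast? then
    trimLoop2 r.dropLast a.dropLast
  else (r, a)
termination_by r.length
decreasing_by
  have := List.length_pos_of_ne_nil h.1
  simp only [List.length_dropLast]
  omega

def trim_variant (pos : Int) (ref : String) (alt : String) : Int × String × String :=
  if ref.length = 1 ∧ alt.length = 1 then (pos, ref, alt)
  else
    let (r1, a1, adj) := trimLoop1 ref.toList alt.toList 0
    let (r2, a2) := trimLoop2 r1 a1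
    (pos + adj, (if r2 = [] then "-" else String.ofList r2), (if a2 = [] then "-" else String.ofList a2))

-- ===== PORT B =====
-- common prefix length (Source B's _cpl)
def cpl (x y : List Char) : Nat :=
  match x, y with
  | c :: x', d :: y' => if c = d then cpl x' y' + 1 else 0
  | _, _ => 0

def trim_variant_alt (pos : Int) (ref : String) (alt : String) : Int × String × String :=
  if ref.length = 1 ∧ alt.length = 1 then (pos, ref, alt)
  else
    let i := cpl ref.toList alt.toList
    let r := ref.toList.drop i
    let a := alt.toList.drop i
    let j := cpl r.reverse a.reverse
    let r' := r.take (r.length - j)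
    let a' := a.take (a.length - j)
    (pos + (i : Int), (if r' = [] then "-" else String.ofList r'), (if a' = [] then "-" else String.ofList a'))

-- ===== PRECONDITION & SPEC =====
def Spec_trim_variant (pos : Int) (ref : String) (alt : String) (out : Int × String × String) : Prop := out = trim_variant_alt pos ref alt
instance (pos : Int) (ref : String) (alt : String) (out : Int × String × String) : Decidable (Spec_trim_variant pos ref alt out) := by unfold Spec_trim_variant; infer_instance

-- ===== CLAIM (what is proved, stated in full; the proofs are below) =====
def Claim_equal_trim_variant : Prop := ∀ (pos : Int) (ref : String) (alt : String), Dom_trim_variant pos ref alt → Spec_trim_variant pos ref alt (trim_variant pos ref alt)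

-- ===== LEMMAS AND PROOFS =====

theorem trimLoop1_eq (r a : List Char) (adj : Int) :
    trimLoop1 r a adj = (r.drop (cpl r a), a.drop (cpl r a), adj + cpl r a) := by
  induction r generalizing a adj with
  | nil => cases a <;> simp [trimLoop1, cpl]
  | cons c r' ih =>
    cases a with
    | nil => simp [trimLoop1, cpl]
    | cons d a' =>
      by_cases hcd : c = d
      · simp [trimLoop1, cpl, hcd, ih]
        ring
      · simp [trimLoop1, cpl, hcd]

theorem cpl_le_left (x y : List Char) : cpl x y ≤ x.length := by
  induction x generalizing y with
  | nil => cases y <;> simp [cpl]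
  | cons c x' ih =>
    cases y with
    | nil => simp [cpl]
    | cons d y' =>
      by_cases hcd : c = d <;> simp [cpl, hcd]
      exact ih y'

theorem reverse_nonempty (r : List Char) (h : r ≠ []) :
    r.reverse = r.getLast h :: r.dropLast.reverse := by
  conv_lhs => rw [← List.dropLast_append_getLast h]
  simp

theorem cpl_le_right (x y : List Char) : cpl x y ≤ y.length := by
  induction x generalizing y with
  | nil => cases y <;> simp [cpl]
  | cons c x' ih =>
    cases y with
    | nil => simp [cpl]
    | cons d y' =>
      by_cases hcd : c = d <;> simp [cpl, hcd]
      exact ih y'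

theorem trimLoop2_eq (r a : List Char) :
    trimLoop2 r a = (r.take (r.length - cpl r.reverse a.reverse),
                     a.take (a.length - cpl r.reverse a.reverse)) := by
  fun_induction trimLoop2 r a with
  | case1 r a h ih =>
    obtain ⟨hr, ha, hl⟩ := h
    rw [ih]
    rw [reverse_nonempty r hr, reverse_nonempty a ha]
    have hl' : r.getLast hr = a.getLast ha := by
      rw [List.getLast?_eq_some_getLast hr, List.getLast?_eq_some_getLast ha] at hl
      exact Option.some.inj hl
    have hcpl : cpl (r.getLast hr :: r.dropLast.reverse) (a.getLast ha :: a.dropLast.reverse)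
        = cpl r.dropLast.reverse a.dropLast.reverse + 1 := by
      simp [cpl, hl']
    rw [hcpl]
    set s := cpl r.dropLast.reverse a.dropLast.reverse with hs
    have hsr : s ≤ r.dropLast.length := by
      simpa using cpl_le_left r.dropLast.reverse a.dropLast.reverse
    have hsa : s ≤ a.dropLast.length := by
      simpa using cpl_le_right r.dropLast.reverse a.dropLast.reverse
    have hrl : r.length = r.dropLast.length + 1 := by
      cases r with
      | nil => exact absurd rfl hr
      | cons c r' => simp
    have hal : a.length = a.dropLast.length + 1 := by
      cases a with
      | nil => exact absurd rfl ha
      | cons c a' => simp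
    have key : ∀ (l : List Char) (k : Nat), k ≤ l.length - 1 → l.dropLast.take k = l.take k := by
      intro l k hk
      rw [List.dropLast_eq_take, List.take_take]
      congr 1
      omega
    rw [Prod.mk.injEq]
    refine ⟨?_, ?_⟩
    · have he : r.dropLast.length - s = r.length - (s + 1) := by omega
      rw [he]
      exact key r _ (by omega)
    · have he : a.dropLast.length - s = a.length - (s + 1) := by omega
      rw [he]
      exact key a _ (by omega)
  | case2 r a h =>
    by_cases hr : r = []
    · subst hr
      simp [cpl]
    · by_cases ha : a = []
      · subst ha
        have : cpl r.reverse [] = 0 := by cases r.reverse <;> simp [cpl]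
        simp [this]
      · have hl : r.getLast hr ≠ a.getLast ha := by
          intro heq
          exact h ⟨hr, ha, by rw [List.getLast?_eq_some_getLast hr, List.getLast?_eq_some_getLast ha, heq]⟩
        rw [reverse_nonempty r hr, reverse_nonempty a ha]
        simp [cpl, hl]

-- ===== VERDICT (by name: the statement is the Claim_ definition above) =====
theorem trim_variant_spec : Claim_equal_trim_variant := by
  intro pos ref alt _
  unfold Spec_trim_variant trim_variant trim_variant_alt
  by_cases h1 : ref.length = 1 ∧ alt.length = 1
  · simp [h1]
  · simp only [h1, if_false]
    rw [trimLoop1_eq]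
    simp only
    rw [trimLoop2_eq]
    push_cast
    ring_nf
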